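-- pv_equiv track=rewrite | github.com/m-franc/kata | @_operator.py | evaluate
-- ===== SOURCE A (Python) =====
-- def a_operation(a, b):
--     if b == 0:
--         return None
--     return (a + b) + (a - b) + (a * b) + (a // b)
--
-- def evaluate(equation):
--     numbers = equation.split(' ')
--     for i, number in enumerate(numbers):
--         if number == '@':
--             numbers.pop(i)
--     numbers = [int(number) for number in numbers]
--     result = 0
--     i = 0
--     result = numbers[0]
--     while i < len(numbers) - 1:
--         result = a_operation(result, numbers[i + 1])
--         if result == None:
--             return None
--         i += 1
--     return result
-- ===== SOURCE B (Python) =====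
-- def evaluate(equation):
--     numbers = [int(tok) for tok in equation.split(' ') if tok != '@']
--     head, rest = numbers[0], numbers[1:]
--     if 0 in rest:
--         return None
--     for b in rest:
--         head = 2 * head + head * b + head // b
--     return head
-- ===== Notes on version B (the rewrite author's own statement) =====
-- stated objective: simpler
-- what changed: Replaces the mutate-while-iterating marker-removal loop by a single filter comprehension, lifts the None short-circuit out of the loop into one membership precheck on the tail of the parsed numbers, and folds with the algebraically collapsed step 2*a + a*b + a//b instead of calling the four-term helper and testing for None every iteration.
import Mathlib
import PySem

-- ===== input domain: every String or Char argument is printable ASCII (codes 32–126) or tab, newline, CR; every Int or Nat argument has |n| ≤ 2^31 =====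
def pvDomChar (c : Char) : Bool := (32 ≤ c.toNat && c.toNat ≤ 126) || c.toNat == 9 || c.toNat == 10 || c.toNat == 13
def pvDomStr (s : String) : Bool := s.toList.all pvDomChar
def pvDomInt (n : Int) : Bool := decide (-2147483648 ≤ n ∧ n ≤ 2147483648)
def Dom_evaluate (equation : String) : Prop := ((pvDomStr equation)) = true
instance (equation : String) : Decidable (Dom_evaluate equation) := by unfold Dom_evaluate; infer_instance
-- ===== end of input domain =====

-- B replaces A's mutate-while-iterating marker removal by a filter, lifts the None
-- short-circuit into one membership precheck, and folds with a collapsed step (simpler).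

-- ===== PORT A =====

-- a_operation: returns none exactly where Python returns None (b == 0)
def a_operation (a b : Int) : Option Int :=
  if b = 0 then none
  else some ((a + b) + (a - b) + (a * b) + PySem.Int.floordiv a b)

-- the 'for i, number in enumerate(numbers): if number == '@': numbers.pop(i)' loop:
-- Python's list iterator checks the CURRENT length each step; pop(i) shifts, the
-- iterator still moves to i+1 (skipping the shifted element).
def popAts (xs : List String) (i : Nat) : List String :=
  if i < xs.length then
    popAts (if xs.getD i "" = "@" then xs.eraseIdx i else xs) (i + 1)
  else xs
termination_by xs.length - i
decreasing_by
  split <;> simp_all [List.length_eraseIdx] <;> omega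

-- the 'while i < len(numbers) - 1' loop (result = numbers[0] before entry)
def evalLoop (numbers : List Int) (result : Int) (i : Nat) : Option Int :=
  if i < numbers.length - 1 then
    match a_operation result (numbers.getD (i + 1) 0) with
    | none => none
    | some r => evalLoop numbers r (i + 1)
  else some result
termination_by numbers.length - 1 - i

-- [int(number) for number in numbers]: ValueError (none from ofStr?) is excluded by Pre_
def toInts (xs : List String) : Option (List Int) := xs.mapM PySem.Int.ofStr?

def evaluate (equation : String) : Option Int :=
  match toInts (popAts ((PySem.Str.split? equation " ").getD []) 0) with
  | none => none            -- int() raised ValueError: outside Pre_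
  | some nums =>
    match nums with
    | [] => none            -- numbers[0] raised IndexError: outside Pre_
    | n0 :: _ => evalLoop nums n0 0

-- ===== PORT B =====

def foldStep (a b : Int) : Int := 2 * a + a * b + PySem.Int.floordiv a b

def evaluate_alt (equation : String) : Option Int :=
  match toInts (((PySem.Str.split? equation " ").getD []).filter (· ≠ "@")) with
  | none => none            -- int() raised ValueError: outside Pre_
  | some [] => none         -- numbers[0] raised IndexError: outside Pre_
  | some (head :: rest) =>
    if rest.contains 0 then none
    else some (rest.foldl foldStep head)

-- ===== PRECONDITION & SPEC =====
-- Pre_ excludes exactly the inputs on which A raises: a token that is neither '@' nor an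
-- int literal (ValueError), two consecutive '@' tokens (the pop-skip bug leaves an '@'
-- behind, so int('@') raises ValueError), or no number left after removal (IndexError).
def Pre_evaluate (equation : String) : Prop :=
  let ts := (PySem.Str.split? equation " ").getD []
  (∀ t ∈ ts, t = "@" ∨ (PySem.Int.ofStr? t).isSome) ∧
  (∀ p ∈ ts.zip ts.tail, ¬(p.1 = "@" ∧ p.2 = "@")) ∧
  (∃ t ∈ ts, t ≠ "@")
instance (equation : String) : Decidable (Pre_evaluate equation) := by
  unfold Pre_evaluate; infer_instance

def pvWitness_evaluate : String := "1 @ 2"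

def Spec_evaluate (equation : String) (out : Option Int) : Prop := out = evaluate_alt equation
instance (equation : String) (out : Option Int) : Decidable (Spec_evaluate equation out) := by unfold Spec_evaluate; infer_instance

-- ===== CLAIM (what is proved, stated in full; the proofs are below) =====
def Claim_equal_evaluate : Prop := ∀ (equation : String), Dom_evaluate equation → Pre_evaluate equation → Spec_evaluate equation (evaluate equation)

-- ===== LEMMAS AND PROOFS =====


-- under "no two consecutive '@'", the buggy pop loop is the filter
theorem eraseIdx_append_cons (pre : List String) (x : String) (rest : List String) :
    (pre ++ x :: rest).eraseIdx pre.length = pre ++ rest := by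
  induction pre with
  | nil => simp
  | cons a t ih => simp [ih]

theorem getD_append_cons (pre : List String) (x : String) (rest : List String) :
    (pre ++ x :: rest).getD pre.length "" = x := by
  simp [List.getD]

-- adjacency pairs of the tail are pairs of the list
theorem zip_tail_subset (l : List String) (p : String × String)
    (h : p ∈ l.tail.zip l.tail.tail) : p ∈ l.zip l.tail := by
  match l with
  | [] => simp at h
  | [a] => simp at h
  | a :: b :: t => exact List.mem_cons_of_mem _ h

theorem popAts_invariant (n : Nat) : ∀ (suf pre : List String),
    suf.length ≤ n →
    (∀ x ∈ pre, x ≠ "@") →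
    (∀ p ∈ suf.zip suf.tail, ¬(p.1 = "@" ∧ p.2 = "@")) →
    popAts (pre ++ suf) pre.length = pre ++ suf.filter (· ≠ "@") := by
  induction n with
  | zero =>
    intro suf pre hn _ _
    have hs : suf = [] := List.eq_nil_of_length_eq_zero (by omega)
    subst hs
    unfold popAts
    simp
  | succ n ih =>
    intro suf pre hn hpre hadj
    match suf with
    | [] =>
      unfold popAts; simp
    | x :: rest =>
      unfold popAts
      rw [getD_append_cons]
      have hlt : pre.length < (pre ++ x :: rest).length := by simp
      rw [if_pos hlt]
      by_cases hx : x = "@"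
      · rw [if_pos hx, eraseIdx_append_cons]
        match rest with
        | [] =>
          unfold popAts
          simp [hx]
        | y :: rest2 =>
          have hy : y ≠ "@" := fun hy => hadj (x, y) (List.mem_cons_self ..) ⟨hx, hy⟩
          have h1 : pre ++ y :: rest2 = (pre ++ [y]) ++ rest2 := by simp
          have h2 : pre.length + 1 = (pre ++ [y]).length := by simp
          rw [h1, h2, ih rest2 (pre ++ [y]) (by simp at hn ⊢; omega)
                (by intro z hz; rcases List.mem_append.mp hz with h | h
                    · exact hpre z h
                    · simp at h; subst h; exact hy)
                (by intro p hp
                    exact hadj p (zip_tail_subset _ p (zip_tail_subset _ p hp)))]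
          simp [hx, hy]
      · rw [if_neg hx]
        have h1 : pre ++ x :: rest = (pre ++ [x]) ++ rest := by simp
        have h2 : pre.length + 1 = (pre ++ [x]).length := by simp
        rw [h1, h2, ih rest (pre ++ [x]) (by simp at hn ⊢; omega)
              (by intro z hz; rcases List.mem_append.mp hz with h | h
                  · exact hpre z h
                  · simp at h; subst h; exact hx)
              (by intro p hp; exact hadj p (zip_tail_subset _ p hp))]
        simp [hx]

theorem popAts_eq_filter (xs : List String)
    (hadj : ∀ p ∈ xs.zip xs.tail, ¬(p.1 = "@" ∧ p.2 = "@")) :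
    popAts xs 0 = xs.filter (· ≠ "@") := by
  have := popAts_invariant xs.length xs [] (Nat.le_refl _) (by simp) hadj
  simpa using this

-- a single step of A's helper, for b ≠ 0, is B's collapsed step
theorem a_operation_eq (a b : Int) (hb : b ≠ 0) :
    a_operation a b = some (foldStep a b) := by
  simp only [a_operation, foldStep, if_neg hb, Option.some.injEq]
  ring

theorem contains_cons_ne (b : Int) (l : List Int) (hb : b ≠ 0) :
    (b :: l).contains 0 = l.contains 0 := by
  simp
  intro h
  exact absurd h.symm hb

-- the while loop, rephrased on the tail it actually consumes
theorem evalLoop_eq (n : Nat) : ∀ (numbers : List Int) (i : Nat) (result : Int),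
    numbers.length - 1 - i ≤ n →
    evalLoop numbers result i =
      if (numbers.drop (i+1)).contains 0 then none
      else some ((numbers.drop (i+1)).foldl foldStep result) := by
  induction n with
  | zero =>
    intro numbers i result hn
    unfold evalLoop
    have h : ¬ i < numbers.length - 1 := by omega
    rw [if_neg h]
    have hd : numbers.drop (i+1) = [] := List.drop_eq_nil_of_le (by omega)
    simp [hd]
  | succ n ih =>
    intro numbers i result hn
    unfold evalLoop
    by_cases h : i < numbers.length - 1
    · rw [if_pos h]
      have hidx : i + 1 < numbers.length := by omega
      have hdrop : numbers.drop (i+1) = numbers[i+1] :: numbers.drop (i+1+1) :=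
        List.drop_eq_getElem_cons hidx
      have hgetD : numbers.getD (i+1) 0 = numbers[i+1] := by
        simp [List.getD, List.getElem?_eq_getElem hidx]
      rw [hgetD, hdrop]
      by_cases hb : numbers[i+1] = 0
      · have hnone : a_operation result numbers[i+1] = none := by
          simp [a_operation, hb]
        rw [hnone]
        have hcont : (numbers[i+1] :: numbers.drop (i+1+1)).contains 0 = true := by
          rw [List.contains_cons]
          simp [hb]
        rw [hcont]
        simp
      · rw [a_operation_eq _ _ hb]
        have hred : (match some (foldStep result numbers[i + 1]) with
            | none => none
            | some r => evalLoop numbers r (i + 1)) =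
            evalLoop numbers (foldStep result numbers[i + 1]) (i + 1) := rfl
        rw [hred, ih numbers (i + 1) _ (by omega),
            contains_cons_ne _ _ hb, List.foldl_cons]
    · rw [if_neg h]
      have hd : numbers.drop (i+1) = [] := List.drop_eq_nil_of_le (by omega)
      simp [hd]

theorem evaluate_spec' (equation : String) (h : Pre_evaluate equation) :
    evaluate equation = evaluate_alt equation := by
  obtain ⟨-, hadj, -⟩ := h
  unfold evaluate evaluate_alt
  rw [popAts_eq_filter _ hadj]
  cases htoi : toInts ((((PySem.Str.split? equation " ").getD [])).filter (· ≠ "@")) with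
  | none => rfl
  | some nums =>
    cases nums with
    | nil => rfl
    | cons n0 rest =>
      show evalLoop (n0 :: rest) n0 0 = _
      rw [evalLoop_eq (n0 :: rest).length (n0 :: rest) 0 n0 (by simp),
          List.drop_one, List.tail_cons]
-- ===== VERDICT (by name: the statement is the Claim_ definition above) =====
theorem evaluate_spec : Claim_equal_evaluate := by
  intro equation _ hpre
  exact evaluate_spec' equation hpre
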